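-- pv_equiv track=rewrite | github.com/ilektron/codewithme | codeeval/052-text_dollar/text_dollar.py | dollars
-- ===== SOURCE A (Python) =====
-- text_under20 = ['', 'One', 'Two', 'Three', 'Four', 'Five', 'Six', 'Seven', 'Eight', 'Nine', 'Ten', 'Eleven', 'Twelve', 'Thirteen', 'Fourteen', 'Fifteen', 'Sixteen', 'Seventeen', 'Eighteen', 'Nineteen']
--
-- text_tens = ['', 'Ten', 'Twenty', 'Thirty', 'Forty', 'Fifty', 'Sixty', 'Seventy', 'Eighty', 'Ninety']
--
-- text_hundred = 'Hundred'
--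
-- text_powers = ['', 'Thousand', 'Million', 'Billion', 'Trillion']
--
-- def one_to_thousand(n):
--     text = ''
--     if n >= 100:
--         text = text_under20[int(n/100)] + text_hundred
--     n = n % 100
--     if n >= 20:
--         text = text + text_tens[int(n/10)]
--         n = n % 10
--     text = text + text_under20[int(n)]
--     return text
--
-- def dollars(n):
--     if n == 0:
--         return 'ZeroDollars'
--     #if n == 1:
--         #return 'OneDollar'
--
--     text = 'Dollars'
--     powers = 0;
--     while n > 0:
--         remainder = n % 1000
--         if remainder > 0:
--             text = one_to_thousand(remainder) + text_powers[powers] + text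
--         n = int(n/1000)
--         powers += 1
--     return text
-- ===== SOURCE B (Python) =====
-- text_under20 = ['', 'One', 'Two', 'Three', 'Four', 'Five', 'Six', 'Seven', 'Eight', 'Nine', 'Ten', 'Eleven', 'Twelve', 'Thirteen', 'Fourteen', 'Fifteen', 'Sixteen', 'Seventeen', 'Eighteen', 'Nineteen']
--
-- text_tens = ['', 'Ten', 'Twenty', 'Thirty', 'Forty', 'Fifty', 'Sixty', 'Seventy', 'Eighty', 'Ninety']
--
-- text_powers = ['', 'Thousand', 'Million', 'Billion', 'Trillion']
--
--
-- def group3(n):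
--     # 0 <= n < 1000: recursive early-return chain, no accumulator
--     if n >= 100:
--         return text_under20[n // 100] + 'Hundred' + group3(n % 100)
--     if n >= 20:
--         return text_tens[n // 10] + text_under20[n % 10]
--     return text_under20[n]
--
--
-- def words(n, p):
--     # recursive, most-significant groups produced by the recursive call
--     if n <= 0:
--         return ''
--     g = n % 1000
--     return words(n // 1000, p + 1) + (group3(g) + text_powers[p] if g else '')
--
--
-- def dollars(n):
--     return 'ZeroDollars' if n == 0 else words(n, 0) + 'Dollars'
-- ===== Notes on version B (the rewrite author's own statement) =====
-- stated objective: alternative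
-- what changed: B is a top-down recursive decomposition: words(n,p) recurses on n//1000 so the more significant groups are produced by the recursive call and concatenated left-to-right, and the 0..999 renderer is a recursive early-return chain (the Hundred case recurses on n%100) instead of A's imperative accumulate-and-prepend while loop with a mutated accumulator.
import Mathlib
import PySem

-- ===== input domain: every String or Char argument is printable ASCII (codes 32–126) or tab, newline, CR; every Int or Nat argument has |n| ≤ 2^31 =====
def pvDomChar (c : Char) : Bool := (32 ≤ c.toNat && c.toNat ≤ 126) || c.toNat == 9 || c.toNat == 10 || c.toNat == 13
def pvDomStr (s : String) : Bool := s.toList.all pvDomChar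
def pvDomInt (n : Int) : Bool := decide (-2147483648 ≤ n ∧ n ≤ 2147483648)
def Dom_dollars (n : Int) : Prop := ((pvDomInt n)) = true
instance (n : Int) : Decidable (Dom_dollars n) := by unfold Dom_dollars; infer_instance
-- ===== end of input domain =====

-- B replaces A's prepend-as-you-go while loop by a top-down recursion on n // 1000 and a
-- recursive early-return 0..999 renderer; alternative decomposition, same cost.

-- ===== PORT A =====
def textUnder20 : List String := ["", "One", "Two", "Three", "Four", "Five", "Six", "Seven", "Eight", "Nine", "Ten", "Eleven", "Twelve", "Thirteen", "Fourteen", "Fifteen", "Sixteen", "Seventeen", "Eighteen", "Nineteen"]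

def textTens : List String := ["", "Ten", "Twenty", "Thirty", "Forty", "Fifty", "Sixty", "Seventy", "Eighty", "Ninety"]

def textPowers : List String := ["", "Thousand", "Million", "Billion", "Trillion"]

-- int(x/k) ported as PySem.Int.truncdiv (exact for |x| < 2^53, which covers Dom);
-- list indexing ported as PySem.List.pyGetD (Python's IndexError is unreachable on Dom: powers ≤ 3).
def one_to_thousand (n : Int) : String :=
  let text : String := if n ≥ 100 then PySem.List.pyGetD textUnder20 (PySem.Int.truncdiv n 100) "" ++ "Hundred" else ""
  let n := PySem.Int.mod n 100
  let p : String × Int := if n ≥ 20 then (text ++ PySem.List.pyGetD textTens (PySem.Int.truncdiv n 10) "", PySem.Int.mod n 10) else (text, n)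
  p.1 ++ PySem.List.pyGetD textUnder20 p.2 ""

def dollarsLoop (n : Int) (powers : Int) (text : String) : String :=
  if h : n > 0 then
    let remainder := PySem.Int.mod n 1000
    let text := if remainder > 0 then one_to_thousand remainder ++ PySem.List.pyGetD textPowers powers "" ++ text else text
    dollarsLoop (PySem.Int.truncdiv n 1000) (powers + 1) text
  else text
termination_by n.toNat
decreasing_by
  have : PySem.Int.truncdiv n 1000 = n / 1000 := Int.tdiv_eq_ediv_of_nonneg (by omega)
  rw [this]; omega

def dollars (n : Int) : String :=
  if n = 0 then "ZeroDollars" else dollarsLoop n 0 "Dollars"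

-- ===== PORT B =====
def group3 (n : Int) : String :=
  if _h : n ≥ 100 then
    PySem.List.pyGetD textUnder20 (PySem.Int.floordiv n 100) "" ++ "Hundred" ++ group3 (PySem.Int.mod n 100)
  else if n ≥ 20 then
    PySem.List.pyGetD textTens (PySem.Int.floordiv n 10) "" ++ PySem.List.pyGetD textUnder20 (PySem.Int.mod n 10) ""
  else PySem.List.pyGetD textUnder20 n ""
termination_by n.toNat
decreasing_by
  have : PySem.Int.mod n 100 = n % 100 := PySem.Int.mod_eq_emod_of_pos (by norm_num)
  rw [this]
  have := Int.emod_nonneg n (show (100:Int) ≠ 0 by norm_num)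
  have := Int.emod_lt_of_pos n (show (0:Int) < 100 by norm_num)
  omega

def wordsB (n : Int) (p : Int) : String :=
  if _h : n ≤ 0 then ""
  else
    let g := PySem.Int.mod n 1000
    wordsB (PySem.Int.floordiv n 1000) (p + 1) ++ (if g ≠ 0 then group3 g ++ PySem.List.pyGetD textPowers p "" else "")
termination_by n.toNat
decreasing_by
  have : PySem.Int.floordiv n 1000 = n / 1000 := PySem.Int.floordiv_eq_ediv_of_pos (by norm_num)
  rw [this]; omega

def dollars_alt (n : Int) : String :=
  if n = 0 then "ZeroDollars" else wordsB n 0 ++ "Dollars"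

-- ===== PRECONDITION & SPEC =====
def Spec_dollars (n : Int) (out : String) : Prop := out = dollars_alt n
instance (n : Int) (out : String) : Decidable (Spec_dollars n out) := by unfold Spec_dollars; infer_instance

-- ===== CLAIM (what is proved, stated in full; the proofs are below) =====
def Claim_equal_dollars : Prop := ∀ (n : Int), Dom_dollars n → Spec_dollars n (dollars n)

-- ===== LEMMAS AND PROOFS =====

theorem one_to_thousand_eq (g : Int) (hg : 0 ≤ g) : one_to_thousand g = group3 g := by
  have e1 : PySem.Int.truncdiv g 100 = g / 100 := Int.tdiv_eq_ediv_of_nonneg hg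
  have e2 : PySem.Int.mod g 100 = g % 100 := PySem.Int.mod_eq_emod_of_pos (by norm_num)
  have e3 : PySem.Int.truncdiv (g % 100) 10 = (g % 100) / 10 :=
    Int.tdiv_eq_ediv_of_nonneg (Int.emod_nonneg g (by norm_num))
  have e4 : PySem.Int.floordiv g 100 = g / 100 := PySem.Int.floordiv_eq_ediv_of_pos (by norm_num)
  have e5 : PySem.Int.floordiv (g % 100) 10 = (g % 100) / 10 := PySem.Int.floordiv_eq_ediv_of_pos (by norm_num)
  have e6 : PySem.Int.mod (g % 100) 10 = (g % 100) % 10 := PySem.Int.mod_eq_emod_of_pos (by norm_num)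
  have hr0 : 0 ≤ g % 100 := Int.emod_nonneg g (by norm_num)
  have hr1 : g % 100 < 100 := Int.emod_lt_of_pos g (by norm_num)
  by_cases hA : g ≥ 100
  · -- group3 recurses once; its argument g % 100 < 100 hits the non-Hundred branches
    rw [group3, group3]
    have hB' : ¬ (g % 100 ≥ 100) := by omega
    have e7 : PySem.Int.mod (g % 100) 100 = g % 100 := by
      rw [PySem.Int.mod_eq_emod_of_pos (by norm_num), Int.emod_emod_of_dvd _ (by norm_num)]
    simp only [one_to_thousand, hA, if_pos, e1, e2, e3, e4, e5, e6, e7, dif_pos, hB', dite_eq_ite, if_neg, not_false_iff]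
    by_cases hC : g % 100 ≥ 20 <;> simp [hC, String.append_assoc]
  · rw [group3]
    have hfd : ¬ (g ≥ 100) := hA
    have e8 : g % 100 = g := Int.emod_eq_of_lt hg (by omega)
    have e9 : PySem.Int.truncdiv g 10 = g / 10 := Int.tdiv_eq_ediv_of_nonneg hg
    simp only [one_to_thousand, hA, if_neg, not_false_iff, e2, e8, e9,
      PySem.Int.floordiv_eq_ediv_of_pos (show (0:Int) < 10 by norm_num)]
    by_cases hC : g ≥ 20 <;> simp [hC]

theorem loop_eq (k : Nat) : ∀ (n p : Int) (t : String), n.toNat ≤ k →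
    dollarsLoop n p t = wordsB n p ++ t := by
  induction k with
  | zero =>
    intro n p t hk
    have hn : ¬ n > 0 := by omega
    rw [dollarsLoop, wordsB]
    simp [hn, show n ≤ 0 by omega]
  | succ k ih =>
    intro n p t hk
    by_cases hn : n > 0
    · have hres0 : 0 ≤ PySem.Int.mod n 1000 := PySem.Int.mod_nonneg n (by norm_num)
      have hdiv : PySem.Int.truncdiv n 1000 = n / 1000 := Int.tdiv_eq_ediv_of_nonneg (by omega)
      have hfdiv : PySem.Int.floordiv n 1000 = n / 1000 := PySem.Int.floordiv_eq_ediv_of_pos (by norm_num)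
      rw [dollarsLoop, wordsB]
      simp only [hn, dif_pos, show ¬ n ≤ 0 by omega, dif_neg, not_false_iff, hdiv, hfdiv]
      rw [ih (n / 1000) (p + 1) _ (by omega)]
      by_cases hg : PySem.Int.mod n 1000 > 0
      · rw [if_pos hg, if_pos (show PySem.Int.mod n 1000 ≠ 0 by omega),
          one_to_thousand_eq _ hres0]
        simp [String.append_assoc]
      · simp only [hg, if_neg, not_false_iff, show ¬ PySem.Int.mod n 1000 ≠ 0 by omega, if_neg,
          String.append_empty]
    · rw [dollarsLoop, wordsB]
      simp [hn, show n ≤ 0 by omega]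

-- ===== VERDICT (by name: the statement is the Claim_ definition above) =====
theorem dollars_spec : Claim_equal_dollars := by
  intro n _
  unfold Spec_dollars dollars dollars_alt
  by_cases h : n = 0
  · simp [h]
  · simp only [h, if_neg, not_false_iff]
    exact loop_eq n.toNat n 0 "Dollars" le_rfl
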